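-- pv_equiv track=rewrite | github.com/981377660LMT/algorithm-study | 5_map/经典题/哈希表存储索引/1794. 统计距离最小的子串对个数-经典题.py | countQuadruples
-- ===== SOURCE A (Python) =====
-- from string import ascii_lowercase
--
-- def countQuadruples(firstString: str, secondString: str) -> int:
--     first, last = {}, {}
--
--     for i, char in enumerate(firstString):
--         first.setdefault(char, i)
--
--     for i, char in enumerate(secondString):
--         last[char] = i
--
--     resMin = int(1e20)
--     res = 0
--     for char in ascii_lowercase:
--         if char in first and char in last:
--             cand = first[char] - last[char]
--             if cand < resMin:
--                 res = 1
--                 resMin = cand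
--             elif cand == resMin:
--                 res += 1
--
--     return res
-- ===== SOURCE B (Python) =====
-- from string import ascii_lowercase
--
-- def countQuadruples(firstString: str, secondString: str) -> int:
--     common = set(firstString) & set(secondString) & set(ascii_lowercase)
--     diffs = sorted(firstString.find(c) - secondString.rfind(c) for c in common)
--     if not diffs:
--         return 0
--     m = diffs[0]
--     k = 1
--     while k < len(diffs) and diffs[k] == m:
--         k += 1
--     return k
-- ===== Notes on version B (the rewrite author's own statement) =====
-- stated objective: faster
-- what changed: B drops A's two index dictionaries and the online running-minimum/tie-counter fold: it intersects the character sets of the two strings with the lowercase alphabet, maps each common letter to firstString.find(c) - secondString.rfind(c), sorts the differences, and returns the length of the leading equal run of the sorted list (0 if empty).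
import Mathlib
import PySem

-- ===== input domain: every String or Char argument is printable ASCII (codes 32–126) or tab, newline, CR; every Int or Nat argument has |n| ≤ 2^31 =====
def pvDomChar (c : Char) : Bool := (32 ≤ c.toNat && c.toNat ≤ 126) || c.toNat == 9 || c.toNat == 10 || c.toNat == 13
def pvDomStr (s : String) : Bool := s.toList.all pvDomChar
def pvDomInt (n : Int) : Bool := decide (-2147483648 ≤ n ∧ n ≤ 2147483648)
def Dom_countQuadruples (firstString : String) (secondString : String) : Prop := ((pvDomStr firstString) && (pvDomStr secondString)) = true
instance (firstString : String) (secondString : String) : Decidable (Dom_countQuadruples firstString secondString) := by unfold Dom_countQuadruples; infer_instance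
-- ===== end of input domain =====

-- B replaces A's dict passes and online min/tie-counter by a set-intersection of the two
-- strings' characters, per-letter find/rfind, sorting the differences and counting the
-- leading run of the sorted list (measured faster: C-level set/str scans replace per-char Python loops).


-- ===== PORT A =====
-- from string import ascii_lowercase
def pvAsciiLowercase : List Char := "abcdefghijklmnopqrstuvwxyz".toList

-- first.setdefault(char, i)
def pvSetdefault (d : PySem.Dict Char Int) (c : Char) (i : Int) : PySem.Dict Char Int :=
  if (d.get? c).isSome then d else d.insert c i

-- the body of A's third loop: running minimum with tie counter
def pvAStep (first last : PySem.Dict Char Int) (st : Int × Int) (c : Char) : Int × Int :=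
  match first.get? c, last.get? c with
  | some fi, some li =>
      let cand := fi - li
      if cand < st.1 then (cand, 1)
      else if cand = st.1 then (st.1, st.2 + 1)
      else st
  | _, _ => st

def countQuadruples (firstString : String) (secondString : String) : Int :=
  let first := (PySem.List.enumerate firstString.toList 0).foldl
      (fun d p => pvSetdefault d p.2 p.1) PySem.Dict.empty
  let last := (PySem.List.enumerate secondString.toList 0).foldl
      (fun d p => d.insert p.2 p.1) (PySem.Dict.empty : PySem.Dict Char Int)
  -- resMin = int(1e20); res = 0
  let st := pvAsciiLowercase.foldl (pvAStep first last) (100000000000000000000, 0)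
  st.2

-- ===== PORT B =====
-- the while loop 'while k < len(diffs) and diffs[k] == m: k += 1; return k'
def pvRunLen : List Int → Int → Int → Int
  | [], _, k => k
  | x :: t, m, k => if x = m then pvRunLen t m (k + 1) else k

def countQuadruples_alt (firstString : String) (secondString : String) : Int :=
  -- common = set(firstString) & set(secondString) & set(ascii_lowercase)
  let common := PySem.Set.inter
      (PySem.Set.inter (PySem.Set.ofList firstString.toList) (PySem.Set.ofList secondString.toList))
      (PySem.Set.ofList pvAsciiLowercase)
  -- diffs = sorted(firstString.find(c) - secondString.rfind(c) for c in common)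
  let diffs := PySem.List.sorted
      (common.map (fun c =>
        PySem.Str.find firstString (String.ofList [c]) -
          PySem.Str.rfind secondString (String.ofList [c])))
      (fun x => x) false
  match diffs with
  | [] => 0
  | m :: t => pvRunLen t m 1

-- ===== PRECONDITION & SPEC =====
-- Pre_ excludes only firstString longer than 10^20 characters: there A's sentinel initial
-- minimum int(1e20) could coincide with or undercut a real index difference; such an input is
-- not constructible in practice (A would die with MemoryError long before returning).
def Pre_countQuadruples (firstString : String) (secondString : String) : Prop :=
  (firstString.toList.length : Int) ≤ 100000000000000000000
instance (firstString : String) (secondString : String) : Decidable (Pre_countQuadruples firstString secondString) := by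
  unfold Pre_countQuadruples; infer_instance

def pvWitness_countQuadruples : String × String := ("abca", "cba")

def Spec_countQuadruples (firstString : String) (secondString : String) (out : Int) : Prop := out = countQuadruples_alt firstString secondString
instance (firstString : String) (secondString : String) (out : Int) : Decidable (Spec_countQuadruples firstString secondString out) := by unfold Spec_countQuadruples; infer_instance

-- ===== CLAIM (what is proved, stated in full; the proofs are below) =====
def Claim_equal_countQuadruples : Prop := ∀ (firstString : String) (secondString : String), Dom_countQuadruples firstString secondString → Pre_countQuadruples firstString secondString → Spec_countQuadruples firstString secondString (countQuadruples firstString secondString)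

-- ===== LEMMAS AND PROOFS =====

-- last index of c in the list, counted from the front (none if absent)
def pvLastIdx? (cs : List Char) (c : Char) : Option Nat :=
  match cs with
  | [] => none
  | a :: t =>
      match pvLastIdx? t c with
      | some i => some (i + 1)
      | none => if a = c then some 0 else none

theorem pvLastIdx?_cons (a : Char) (t : List Char) (c : Char) :
    pvLastIdx? (a :: t) c =
      match pvLastIdx? t c with
      | some i => some (i + 1)
      | none => if a = c then some 0 else none := rfl

theorem pvLastIdx?_isSome_iff (cs : List Char) (c : Char) :
    (pvLastIdx? cs c).isSome = true ↔ c ∈ cs := by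
  induction cs with
  | nil => simp [pvLastIdx?]
  | cons a t ih =>
    rw [pvLastIdx?_cons]
    rcases h : pvLastIdx? t c with _ | i
    · rw [h] at ih
      by_cases hac : a = c
      · simp [hac, ← ih]
      · simp [hac, ← ih]
        exact fun h' => hac h'.symm
    · rw [h] at ih
      simp [← ih]

-- the per-letter candidate difference both programs agree on
def pvCand (cs ts : List Char) (c : Char) : Option Int :=
  match cs.idxOf? c, pvLastIdx? ts c with
  | some i, some j => some ((i : Int) - (j : Int))
  | _, _ => none

-- the min/tie-count step, abstracted from A's loop
def pvStep (st : Int × Int) (x : Int) : Int × Int :=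
  if x < st.1 then (x, (1 : Int)) else if x = st.1 then (st.1, st.2 + 1) else st

-- A's per-letter step, parametrised by the candidate function
def pvOptStep (g : Char → Option Int) (st : Int × Int) (c : Char) : Int × Int :=
  match g c with
  | some b => pvStep st b
  | none => st

theorem pv_first_fold (cs : List Char) (c : Char) :
    ∀ (k : Int) (d : PySem.Dict Char Int),
      ((PySem.List.enumerate cs k).foldl (fun d p => pvSetdefault d p.2 p.1) d).get? c =
        match d.get? c with
        | some v => some v
        | none => (cs.idxOf? c).map (fun i => k + (i : Int)) := by
  induction cs with
  | nil => intro k d; simp [PySem.List.enumerate]; cases d.get? c <;> simp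
  | cons a t ih =>
    intro k d
    simp only [PySem.List.enumerate, List.foldl_cons]
    rw [ih]
    by_cases hac : a = c
    · subst hac
      rcases hd : d.get? a with _ | v
      · have : (pvSetdefault d a k).get? a = some k := by
          simp [pvSetdefault, hd, PySem.Dict.get?_insert_self]
        rw [this]
        simp [List.idxOf?_cons]
      · have : pvSetdefault d a k = d := by simp [pvSetdefault, hd]
        rw [this, hd]
    · have h2 : (pvSetdefault d a k).get? c = d.get? c := by
        unfold pvSetdefault
        split
        · rfl
        · exact PySem.Dict.get?_insert_of_ne d _ (Ne.symm hac)
      rw [h2]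
      rcases hd : d.get? c with _ | v
      · simp [List.idxOf?_cons, hac, beq_iff_eq]
        rcases List.idxOf? c t with _ | i <;> simp [Option.map]
        ring
      · rfl

theorem pv_find_go (c : Char) (cs : List Char) :
    ∀ (k : Nat), PySem.Chars.find.go [c] cs k =
      match cs.idxOf? c with
      | some i => ((k + i : Nat) : Int)
      | none => -1 := by
  induction cs with
  | nil => intro k; rw [PySem.Chars.find.go.eq_def]; simp
  | cons a t ih =>
    intro k
    rw [PySem.Chars.find.go.eq_def]
    simp only []
    by_cases hac : a = c
    · subst hac
      simp [List.isPrefixOf, List.idxOf?_cons]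
    · have hpre : [c].isPrefixOf (a :: t) = false := by
        simp [List.isPrefixOf]; exact fun h => absurd h.symm hac
      rw [hpre]
      simp only [if_false, Bool.false_eq_true]
      rw [ih (k+1)]
      simp [List.idxOf?_cons, hac, beq_iff_eq]
      rcases List.idxOf? c t with _ | i <;> simp
      ring

theorem pv_find_singleton (cs : List Char) (c : Char) :
    PySem.Chars.find cs [c] =
      match cs.idxOf? c with
      | some i => (i : Int)
      | none => -1 := by
  show PySem.Chars.find.go [c] cs 0 = _
  rw [pv_find_go]
  rcases cs.idxOf? c with _ | i <;> simp

theorem pv_last_fold (cs : List Char) (c : Char) :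
    ∀ (k : Int) (d : PySem.Dict Char Int),
      ((PySem.List.enumerate cs k).foldl (fun d p => d.insert p.2 p.1) d).get? c =
        match pvLastIdx? cs c with
        | some i => some (k + (i : Int))
        | none => d.get? c := by
  induction cs with
  | nil => intro k d; simp [PySem.List.enumerate, pvLastIdx?]
  | cons a t ih =>
    intro k d
    simp only [PySem.List.enumerate, List.foldl_cons]
    rw [ih, pvLastIdx?_cons]
    rcases h : pvLastIdx? t c with _ | i
    · simp only []
      by_cases hac : a = c
      · subst hac
        simp [PySem.Dict.get?_insert_self]
      · simp [hac, PySem.Dict.get?_insert_of_ne d _ (Ne.symm hac)]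
    · simp only []
      congr 1
      push_cast
      ring

theorem pvLastIdx?_snoc (l : List Char) (a c : Char) :
    pvLastIdx? (l ++ [a]) c = if a = c then some l.length else pvLastIdx? l c := by
  induction l with
  | nil => simp [pvLastIdx?]
  | cons b t ih =>
    rw [List.cons_append, pvLastIdx?_cons, ih, pvLastIdx?_cons]
    by_cases hac : a = c
    · simp [hac]
    · simp [hac]

theorem pv_prefix_singleton (cs : List Char) (c : Char) (m : Nat) :
    [c].isPrefixOf (cs.drop m) = true ↔ cs[m]? = some c := by
  rcases h : cs.drop m with _ | ⟨a, t⟩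
  · have hlen : cs.length ≤ m := List.drop_eq_nil_iff.mp h
    have hnone : cs[m]? = none := List.getElem?_eq_none hlen
    simp [List.isPrefixOf, hnone]
  · have : cs[m]? = some a := by
      have h2 : (List.drop m cs)[0]? = cs[m + 0]? := List.getElem?_drop
      rw [h] at h2; simpa using h2.symm
    simp [List.isPrefixOf, this]
    constructor
    · rintro ⟨rfl⟩; rfl
    · rintro ⟨rfl⟩; simp

theorem pv_rfind_go (cs : List Char) (c : Char) :
    ∀ (n : Nat), PySem.Chars.rfind.go cs [c] n =
      match pvLastIdx? (cs.take (n+1)) c with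
      | some i => (i : Int)
      | none => -1 := by
  intro n
  induction n with
  | zero =>
    rw [PySem.Chars.rfind.go.eq_def]
    simp only []
    rcases hcs : cs with _ | ⟨a, t⟩
    · simp [List.isPrefixOf, pvLastIdx?]
    · have : [c].isPrefixOf (a :: t) = true ↔ a = c := by
        simp [List.isPrefixOf]
        constructor
        · rintro ⟨rfl⟩; rfl
        · rintro rfl; simp
      by_cases hac : a = c
      · simp [List.take_add_one, pvLastIdx?, hac]
      · have hf : [c].isPrefixOf (a :: t) = false := by
          rcases hb : [c].isPrefixOf (a :: t) with _ | _
          · rfl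
          · exact absurd (this.mp hb) hac
        simp [hf, pvLastIdx?, hac]
  | succ j ih =>
    rw [PySem.Chars.rfind.go.eq_def]
    simp only []
    by_cases hlt : j + 1 < cs.length
    · have hget : cs[j+1]? = some cs[j+1] := List.getElem?_eq_getElem hlt
      have htake : cs.take (j+2) = cs.take (j+1) ++ [cs[j+1]] := by
        rw [List.take_add_one, hget]; rfl
      by_cases hc : cs[j+1] = c
      · have hp : [c].isPrefixOf (cs.drop (j+1)) = true :=
          (pv_prefix_singleton cs c (j+1)).mpr (by rw [hget, hc])
        rw [hp]
        simp [htake, pvLastIdx?_snoc, hc, List.length_take, Nat.min_eq_left (le_of_lt hlt)]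
      · have hp : [c].isPrefixOf (cs.drop (j+1)) = false := by
          rcases hb : [c].isPrefixOf (cs.drop (j+1)) with _ | _
          · rfl
          · have := (pv_prefix_singleton cs c (j+1)).mp hb
            rw [hget] at this
            exact absurd (Option.some_injective _ this) hc
        rw [hp]
        simp only [Bool.false_eq_true, if_false]
        rw [ih, htake, pvLastIdx?_snoc, if_neg hc]
    · have hd : cs.drop (j+1) = [] := List.drop_eq_nil_iff.mpr (by omega)
      have hp : [c].isPrefixOf (cs.drop (j+1)) = false := by simp [hd]
      rw [hp]
      simp only [Bool.false_eq_true, if_false]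
      rw [ih, List.take_of_length_le (by omega), List.take_of_length_le (by omega)]

theorem pv_rfind_singleton (cs : List Char) (c : Char) :
    PySem.Chars.rfind cs [c] =
      match pvLastIdx? cs c with
      | some i => (i : Int)
      | none => -1 := by
  show PySem.Chars.rfind.go cs [c] cs.length = _
  rcases hcs : cs.length with _ | m
  · have hnil : cs = [] := List.length_eq_zero_iff.mp hcs
    subst hnil
    rw [pv_rfind_go]
    rfl
  · rw [PySem.Chars.rfind.go.eq_def]
    simp only []
    have hd : cs.drop (m+1) = [] := List.drop_eq_nil_iff.mpr (by omega)
    have hp : [c].isPrefixOf (cs.drop (m+1)) = false := by simp [hd]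
    rw [hp]
    simp only [Bool.false_eq_true, if_false]
    rw [pv_rfind_go, List.take_of_length_le (by omega)]

theorem pv_foldl_min_le (t : List Int) : ∀ m : Int, t.foldl min m ≤ m := by
  induction t with
  | nil => intro m; simp
  | cons y t ih =>
    intro m
    simp only [List.foldl_cons]
    exact le_trans (ih (min m y)) (min_le_left m y)

theorem pv_foldl_min_mem (t : List Int) :
    ∀ m : Int, t.foldl min m = m ∨ t.foldl min m ∈ t := by
  induction t with
  | nil => intro m; simp
  | cons y t ih =>
    intro m
    simp only [List.foldl_cons, List.mem_cons]
    rcases ih (min m y) with h | h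
    · rcases le_total m y with hmy | hym
      · left; rw [h, min_eq_left hmy]
      · right; left; rw [h, min_eq_right hym]
    · right; right; exact h

theorem pv_foldl_min_le_all (t : List Int) :
    ∀ (m : Int), ∀ y ∈ t, t.foldl min m ≤ y := by
  induction t with
  | nil => intro m y hy; simp at hy
  | cons z t ih =>
    intro m y hy
    simp only [List.foldl_cons]
    rcases List.mem_cons.mp hy with rfl | hy
    · exact le_trans (pv_foldl_min_le t (min m y)) (min_le_right m y)
    · exact ih (min m z) y hy

theorem pv_minloop (ds : List Int) :
    ∀ (m r : Int),
      ds.foldl pvStep (m, r) =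
        (ds.foldl min m,
         if ds.foldl min m < m then (List.count (ds.foldl min m) ds : Int)
         else r + (List.count (ds.foldl min m) ds : Int)) := by
  induction ds with
  | nil => intro m r; simp
  | cons x t ih =>
    intro m r
    have hT : ∀ m' : Int, t.foldl min m' ≤ m' := fun m' => pv_foldl_min_le t m'
    simp only [List.foldl_cons, List.count_cons, pvStep]
    rcases lt_trichotomy x m with hlt | heq | hgt
    · rw [if_pos hlt, ih, min_eq_right (le_of_lt hlt)]
      set T := t.foldl min x with hTdef
      have hTx : T ≤ x := hT x
      have hTm : T < m := lt_of_le_of_lt hTx hlt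
      rw [if_pos hTm]
      by_cases hTeq : T = x
      · simp [hTeq.symm]
        ring
      · have hxT : x ≠ T := fun h => hTeq h.symm
        have : T < x := lt_of_le_of_ne hTx hTeq
        simp [if_pos this, hxT]
    · subst heq
      rw [if_neg (lt_irrefl x), if_pos rfl, ih, min_self]
      set T := t.foldl min x with hTdef
      have hTx : T ≤ x := hT x
      by_cases hTeq : T = x
      · simp [hTeq.symm]
        ring
      · have hxT : x ≠ T := fun h => hTeq h.symm
        have hlt : T < x := lt_of_le_of_ne hTx hTeq
        simp [if_pos hlt, hxT]
    · rw [if_neg (not_lt.mpr (le_of_lt hgt)), if_neg (ne_of_gt hgt), ih,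
        min_eq_left (le_of_lt hgt)]
      set T := t.foldl min m with hTdef
      have hTm : T ≤ m := hT m
      have hTx : x ≠ T := Ne.symm (ne_of_lt (lt_of_le_of_lt hTm hgt))
      simp [hTx]

theorem pv_foldl_optStep (g : Char → Option Int) (l : List Char) :
    ∀ st : Int × Int, l.foldl (pvOptStep g) st = (l.filterMap g).foldl pvStep st := by
  induction l with
  | nil => intro st; simp
  | cons a t ih =>
    intro st
    simp only [List.foldl_cons, List.filterMap_cons, pvOptStep]
    rcases g a with _ | b
    · exact ih st
    · simp only [List.foldl_cons]
      exact ih (pvStep st b)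

-- A's fold over the alphabet, re-expressed through the common candidate function
theorem pv_A_eq (f s : String) :
    countQuadruples f s =
      ((pvAsciiLowercase.filterMap (pvCand f.toList s.toList)).foldl pvStep
        (100000000000000000000, 0)).2 := by
  simp only [countQuadruples]
  have hstep : pvAStep
      ((PySem.List.enumerate f.toList 0).foldl (fun d p => pvSetdefault d p.2 p.1) PySem.Dict.empty)
      ((PySem.List.enumerate s.toList 0).foldl (fun d p => d.insert p.2 p.1) PySem.Dict.empty) =
      pvOptStep (pvCand f.toList s.toList) := by
    funext st c
    unfold pvAStep pvCand pvOptStep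
    rw [pv_first_fold f.toList c 0 PySem.Dict.empty, pv_last_fold s.toList c 0 PySem.Dict.empty]
    rw [show (PySem.Dict.empty : PySem.Dict Char Int).get? c = none from rfl]
    rcases hi : f.toList.idxOf? c with _ | i <;>
      rcases hj : pvLastIdx? s.toList c with _ | j <;>
      simp only [hi, hj] <;> simp [pvStep]
  rw [hstep, pv_foldl_optStep]

-- filterMap as map over filter, for the candidate function
theorem pv_filterMap_eq (g : Char → Option Int) (l : List Char) :
    l.filterMap g = (l.filter (fun c => (g c).isSome)).map (fun c => (g c).getD 0) := by
  induction l with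
  | nil => simp
  | cons a t ih =>
    simp only [List.filterMap_cons, List.filter_cons]
    rcases h : g a with _ | v
    · simp [h, ih]
    · simp [h, ih]

-- every candidate difference is below A's sentinel (uses Pre_)
theorem pv_cand_lt (f s : String) (hpre : Pre_countQuadruples f s) :
    ∀ v ∈ pvAsciiLowercase.filterMap (pvCand f.toList s.toList),
      v < 100000000000000000000 := by
  intro v hv
  rcases List.mem_filterMap.mp hv with ⟨c, _, hc⟩
  unfold pvCand at hc
  rcases hi : f.toList.idxOf? c with _ | i <;>
    rcases hj : pvLastIdx? s.toList c with _ | j <;> rw [hi, hj] at hc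
  · change (none : Option Int) = some v at hc
    simp at hc
  · change (none : Option Int) = some v at hc
    simp at hc
  · change (none : Option Int) = some v at hc
    simp at hc
  · change some ((i : Int) - (j : Int)) = some v at hc
    obtain rfl : (i : Int) - (j : Int) = v := Option.some_injective _ hc
    obtain ⟨hlen, -⟩ := List.idxOf?_eq_some_iff.mp hi
    unfold Pre_countQuadruples at hpre
    omega

-- B's unsorted diffs list is a permutation of A's candidate list
theorem pv_perm (f s : String) :
    ((PySem.Set.inter
        (PySem.Set.inter (PySem.Set.ofList f.toList) (PySem.Set.ofList s.toList))
        (PySem.Set.ofList pvAsciiLowercase)).map (fun c =>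
          PySem.Str.find f (String.ofList [c]) -
            PySem.Str.rfind s (String.ofList [c]))).Perm
      (pvAsciiLowercase.filterMap (pvCand f.toList s.toList)) := by
  set L := PySem.Set.inter
      (PySem.Set.inter (PySem.Set.ofList f.toList) (PySem.Set.ofList s.toList))
      (PySem.Set.ofList pvAsciiLowercase) with hL
  have hmemL : ∀ c, c ∈ L ↔ c ∈ f.toList ∧ c ∈ s.toList ∧ c ∈ pvAsciiLowercase := by
    intro c
    rw [hL, PySem.Set.mem_inter, PySem.Set.mem_inter]
    simp [PySem.Set.mem_ofList, and_assoc]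
  -- on L the mapped function is the candidate value
  have hmap : L.map (fun c => PySem.Str.find f (String.ofList [c]) -
      PySem.Str.rfind s (String.ofList [c])) =
      L.map (fun c => (pvCand f.toList s.toList c).getD 0) := by
    apply List.map_congr_left
    intro c hc
    obtain ⟨hcf, hcs, -⟩ := (hmemL c).mp hc
    obtain ⟨i, hi⟩ := Option.isSome_iff_exists.mp (List.isSome_idxOf?.mpr hcf)
    obtain ⟨j, hj⟩ := Option.isSome_iff_exists.mp ((pvLastIdx?_isSome_iff s.toList c).mpr hcs)
    rw [PySem.Str.find_eq, PySem.Str.rfind_eq,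
      show (String.ofList [c]).toList = [c] by simp,
      pv_find_singleton, pv_rfind_singleton]
    unfold pvCand
    rw [hi, hj]
    simp
  rw [hmap, pv_filterMap_eq]
  apply List.Perm.map
  -- the two character lists are nodup with the same membership
  have hnodupL : L.Nodup := by
    rw [hL]
    exact PySem.Set.nodup_inter _ _ (PySem.Set.nodup_inter _ _ (PySem.Set.nodup_ofList _))
  have hnodupR : (pvAsciiLowercase.filter
      (fun c => (pvCand f.toList s.toList c).isSome)).Nodup :=
    List.Nodup.filter _ (by decide)
  rw [List.perm_ext_iff_of_nodup hnodupL hnodupR]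
  intro c
  rw [hmemL c, List.mem_filter]
  unfold pvCand
  constructor
  · rintro ⟨hcf, hcs, hca⟩
    obtain ⟨i, hi⟩ := Option.isSome_iff_exists.mp (List.isSome_idxOf?.mpr hcf)
    obtain ⟨j, hj⟩ := Option.isSome_iff_exists.mp ((pvLastIdx?_isSome_iff s.toList c).mpr hcs)
    refine ⟨hca, ?_⟩
    rw [hi, hj]
    rfl
  · rintro ⟨hca, hsome⟩
    rcases hi : f.toList.idxOf? c with _ | i <;>
      rcases hj : pvLastIdx? s.toList c with _ | j <;> rw [hi, hj] at hsome
    · exact absurd hsome (by simp)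
    · exact absurd hsome (by simp)
    · exact absurd hsome (by simp)
    · exact ⟨List.isSome_idxOf?.mp (by rw [hi]; rfl),
        (pvLastIdx?_isSome_iff s.toList c).mp (by rw [hj]; rfl), hca⟩

-- the while loop on a ≤-sorted tail counts the occurrences of the head
theorem pv_runLen (t : List Int) (m : Int) :
    ∀ k : Int, (m :: t).Pairwise (· ≤ ·) → pvRunLen t m k = k + (t.count m : Int) := by
  induction t with
  | nil => intro k _; simp [pvRunLen]
  | cons x r ih =>
    intro k hp
    have hmx : m ≤ x := (List.pairwise_cons.mp hp).1 x (by simp)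
    have hxr : (x :: r).Pairwise (· ≤ ·) := (List.pairwise_cons.mp hp).2
    simp only [pvRunLen]
    by_cases hx : x = m
    · subst hx
      have hp' : (x :: r).Pairwise (· ≤ ·) := hxr
      rw [if_pos rfl, ih (k + 1) hp']
      simp
      ring
    · rw [if_neg hx]
      have hmltx : m < x := lt_of_le_of_ne hmx (fun h => hx h.symm)
      have hcount : (x :: r).count m = 0 := by
        rw [List.count_eq_zero]
        intro hmem
        rcases List.mem_cons.mp hmem with rfl | hmr
        · exact absurd rfl hx
        · have := (List.pairwise_cons.mp hxr).1 m hmr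
          omega
      rw [hcount]
      simp

-- ===== VERDICT (by name: the statement is the Claim_ definition above) =====
theorem countQuadruples_spec : Claim_equal_countQuadruples := by
  intro f s _hdom hpre
  unfold Spec_countQuadruples
  rw [pv_A_eq f s]
  simp only [countQuadruples_alt]
  have hperm := pv_perm f s
  have hbound := pv_cand_lt f s hpre
  set diffsA := pvAsciiLowercase.filterMap (pvCand f.toList s.toList) with hdA
  set diffsB := (PySem.Set.inter
      (PySem.Set.inter (PySem.Set.ofList f.toList) (PySem.Set.ofList s.toList))
      (PySem.Set.ofList pvAsciiLowercase)).map (fun c =>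
        PySem.Str.find f (String.ofList [c]) -
          PySem.Str.rfind s (String.ofList [c])) with hdB
  rcases hA : diffsA with _ | ⟨x, ds⟩
  · -- no common letter: both sides return 0
    have hBnil : diffsB = [] := List.Perm.eq_nil (hA ▸ hperm)
    rw [hBnil]
    rfl
  · -- nonempty: A returns the tie count of the minimum
    rw [hA] at hperm hbound
    have hx : x < 100000000000000000000 := hbound x (List.mem_cons_self)
    rw [pv_minloop]
    simp only [List.foldl_cons]
    rw [min_eq_right (le_of_lt hx)]
    set M := ds.foldl min x with hM
    have hMx : M ≤ x := pv_foldl_min_le ds x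
    rw [if_pos (lt_of_le_of_lt hMx hx)]
    -- B's side: sorted list is nonempty, head = M, run length = count
    have hsp := PySem.List.sorted_perm diffsB (fun x => x) false
    rcases hS : PySem.List.sorted diffsB (fun x => x) false with _ | ⟨m, t⟩
    · have : diffsB = [] := (PySem.List.sorted_eq_nil_iff _ _ _).mp hS
      rw [this] at hperm
      exact absurd hperm.symm (by simp)
    · have hpair : (m :: t).Pairwise (· ≤ ·) := by
        have := PySem.List.sorted_pairwise (xs := diffsB) (key := fun x => x)
        rw [hS] at this
        exact this
      rw [show (match m :: t with | [] => (0 : Int) | m :: t => pvRunLen t m 1) = pvRunLen t m 1 from rfl,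
        pv_runLen t m 1 hpair]
      -- head of the sorted list is the minimum M
      have hMmem : M ∈ x :: ds := by
        rcases pv_foldl_min_mem ds x with h | h
        · rw [hM, h]; exact List.mem_cons_self
        · exact List.mem_cons_of_mem x h
      have hmmemB : m ∈ diffsB := by
        rw [← PySem.List.mem_sorted diffsB (fun x => x) false, hS]
        exact List.mem_cons_self
      have hmmemA : m ∈ x :: ds := hperm.mem_iff.mp hmmemB
      have hMle : M ≤ m := by
        rcases List.mem_cons.mp hmmemA with rfl | h
        · exact hMx
        · exact pv_foldl_min_le_all ds x m h
      have hmle : m ≤ M := by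
        have := PySem.List.key_head_sorted_le (xs := diffsB) (key := fun x => x) hS
        exact this M (hperm.mem_iff.mpr hMmem)
      have hmM : m = M := le_antisymm hmle hMle
      have h1 : (m :: t).count m = diffsB.count m := by
        have h2 := hsp.count_eq m
        rw [hS] at h2
        exact h2
      have h3 : (m :: t).count m = (x :: ds).count m := by
        rw [h1]; exact hperm.count_eq m
      rw [List.count_cons_self] at h3
      rw [← hmM]
      omega
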